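-- pv_equiv track=rewrite | github.com/fcesargm/desafiosDojoPuzzle | contandoAsLetrasENumeros/contandoAsLetrasENumeros.py | contando
-- ===== SOURCE A (Python) =====
-- def contando(n):
--     b = str(n)
--     soma = 0
--     for i in range(len(b)):
--         if b[i] == '1':
--             alga = 2
--         elif b[i] == '4':
--             alga = 6
--         elif b[i] == '5':
--             alga = 5
--         else:
--             alga = 4
--         soma = alga + soma
--     return soma
-- ===== SOURCE B (Python) =====
-- def contando(n):
--     s = str(n)
--     return 4 * len(s) + s.count('1') * (2 - 4) + s.count('4') * (6 - 4) + s.count('5') * (5 - 4)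
-- ===== Notes on version B (the rewrite author's own statement) =====
-- stated objective: simpler
-- what changed: Replaced the per-character if/elif accumulation loop by a closed form: four times the string length plus count-based adjustments for the three special digits.
import Mathlib
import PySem

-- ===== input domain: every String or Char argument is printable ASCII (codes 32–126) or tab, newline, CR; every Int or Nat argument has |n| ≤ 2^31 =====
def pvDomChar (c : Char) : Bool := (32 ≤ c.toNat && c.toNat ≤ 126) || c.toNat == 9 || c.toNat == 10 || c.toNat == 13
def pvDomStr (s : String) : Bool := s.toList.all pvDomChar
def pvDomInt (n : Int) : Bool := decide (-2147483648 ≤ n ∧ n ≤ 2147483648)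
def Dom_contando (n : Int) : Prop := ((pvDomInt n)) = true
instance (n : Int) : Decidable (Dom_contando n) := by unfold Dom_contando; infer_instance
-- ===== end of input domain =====

-- B replaces A's per-character if/elif accumulation loop by a closed form from character counts (objective: simpler).
-- ===== PORT A =====
def contando (n : Int) : Int :=
  (PySem.Int.toChars n).foldl (fun soma c =>
    (if c == '1' then (2 : Int)
     else if c == '4' then 6
     else if c == '5' then 5
     else 4) + soma) 0

-- ===== PORT B =====
def contando_alt (n : Int) : Int :=
  let cs := PySem.Int.toChars n
  4 * (cs.length : Int) + (cs.count '1' : Int) * (2 - 4)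
    + (cs.count '4' : Int) * (6 - 4) + (cs.count '5' : Int) * (5 - 4)

-- ===== PRECONDITION & SPEC =====
def Spec_contando (n : Int) (out : Int) : Prop := out = contando_alt n
instance (n : Int) (out : Int) : Decidable (Spec_contando n out) := by unfold Spec_contando; infer_instance

-- ===== CLAIM (what is proved, stated in full; the proofs are below) =====
def Claim_equal_contando : Prop := ∀ (n : Int), Dom_contando n → Spec_contando n (contando n)

-- ===== LEMMAS AND PROOFS =====

-- ===== VERDICT (by name: the statement is the Claim_ definition above) =====
theorem contando_fold (l : List Char) (a : Int) :
    l.foldl (fun soma c =>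
      (if c == '1' then (2 : Int)
       else if c == '4' then 6
       else if c == '5' then 5
       else 4) + soma) a
    = a + 4 * (l.length : Int) + (l.count '1' : Int) * (2 - 4)
        + (l.count '4' : Int) * (6 - 4) + (l.count '5' : Int) * (5 - 4) := by
  induction l generalizing a with
  | nil => simp
  | cons c t ih =>
    simp only [List.foldl_cons, ih, List.count_cons, List.length_cons]
    by_cases h1 : c = '1' <;> by_cases h4 : c = '4' <;> by_cases h5 : c = '5' <;>
      simp_all <;> ring

theorem contando_spec : Claim_equal_contando := by
  intro n _
  unfold Spec_contando contando contando_alt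
  rw [contando_fold]
  ring
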